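-- pv_equiv track=rewrite | github.com/alifbintang1/erpepe | v2/src/res_sat.py | res_sat
-- ===== SOURCE A (Python) =====
-- def res_sat(nvars, clauses):
--     """
--     Implement the RES-SAT algorithm to find a satisfying interpretation T.
--     Based on the pseudocode from "Prosedur RES-SAT (Textbook Figure 4.15)".
--     """
--     T = set()  # Initialize interpretation T as an empty set
--
--     # Iterate over each atom p_i from 1 to n
--     for i in range(1, nvars + 1):
--         p_i = i
--         add_neg_pi = False
--
--         # Check if there exists a clause c such that ~c ⊆ T ∪ {p_i}
--         for clause in clauses:
--             neg_c = [-lit for lit in clause]  # Compute ~c (negation of clause c)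
--             if all(lit in T or lit == p_i for lit in neg_c):
--                 add_neg_pi = True
--                 break
--
--         # Update T based on the condition
--         if add_neg_pi:
--             T.add(-p_i)  # Add ~p_i to T
--         else:
--             T.add(p_i)  # Add p_i to T
--
--     return T
-- ===== SOURCE B (Python) =====
-- def res_sat(nvars, clauses):
--     # Negate each clause once up front, then keep only the still-uncovered
--     # literals of each negated clause; stop early once some clause is fully
--     # covered (from then on every step adds the negative literal).
--     rem = [[-lit for lit in clause] for clause in clauses]
--     T = set()
--     for i in range(1, nvars + 1):
--         if any(not r for r in rem):
--             T.update(-j for j in range(i, nvars + 1))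
--             return T
--         if any(all(l == i for l in r) for r in rem):
--             v = -i
--         else:
--             v = i
--         T.add(v)
--         rem = [[l for l in r if l != v] for r in rem]
--     return T
-- ===== Notes on version B (the rewrite author's own statement) =====
-- stated objective: alternative
-- what changed: B negates every clause once up front, then maintains per-clause residual lists of still-uncovered negated literals (shrinking them after each assignment) and returns early with all-negative assignments once some clause is fully covered, instead of A's re-negating and re-scanning every full clause at every variable step.
import Mathlib
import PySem

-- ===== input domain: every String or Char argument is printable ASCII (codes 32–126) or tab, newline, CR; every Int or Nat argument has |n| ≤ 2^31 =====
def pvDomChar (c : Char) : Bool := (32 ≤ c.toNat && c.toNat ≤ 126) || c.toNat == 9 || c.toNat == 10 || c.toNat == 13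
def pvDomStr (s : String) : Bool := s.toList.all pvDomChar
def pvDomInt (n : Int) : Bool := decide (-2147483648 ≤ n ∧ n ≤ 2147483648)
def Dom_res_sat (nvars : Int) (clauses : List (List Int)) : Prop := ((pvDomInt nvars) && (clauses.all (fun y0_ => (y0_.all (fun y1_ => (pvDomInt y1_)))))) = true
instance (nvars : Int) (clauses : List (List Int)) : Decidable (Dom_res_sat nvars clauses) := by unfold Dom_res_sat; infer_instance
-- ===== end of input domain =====

-- B negates each clause once up front, keeps only the still-uncovered literals of each
-- negated clause, and returns early once some clause is fully covered (objective: alternative).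

-- ===== PORT A =====
def res_sat (nvars : Int) (clauses : List (List Int)) : List Int :=
  (PySem.List.pyRange 1 (nvars + 1) 1).foldl
    (fun T i =>
      -- inner for-loop with break = any over clauses, in order
      let add_neg_pi := clauses.any (fun clause =>
        (clause.map (fun lit => -lit)).all (fun lit => PySem.Set.contains T lit || lit == i))
      if add_neg_pi then PySem.Set.add T (-i) else PySem.Set.add T i)
    PySem.Set.empty

-- ===== PORT B =====
def resSatAltGo : List Int → List (List Int) → PySem.Set Int → List Int
  | [], _, T => T
  | i :: rest, rem, T =>
    if rem.any (fun r => r.isEmpty) then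
      -- T.update(-j for j in range(i, nvars+1)); return T
      (i :: rest).foldl (fun T j => PySem.Set.add T (-j)) T
    else
      let v := if rem.any (fun r => r.all (fun l => l == i)) then -i else i
      resSatAltGo rest (rem.map (fun r => r.filter (fun l => l != v))) (PySem.Set.add T v)

def res_sat_alt (nvars : Int) (clauses : List (List Int)) : List Int :=
  resSatAltGo (PySem.List.pyRange 1 (nvars + 1) 1)
    (clauses.map (fun clause => clause.map (fun lit => -lit)))
    PySem.Set.empty

-- ===== PRECONDITION & SPEC =====
def Spec_res_sat (nvars : Int) (clauses : List (List Int)) (out : List Int) : Prop := out = res_sat_alt nvars clauses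
instance (nvars : Int) (clauses : List (List Int)) (out : List Int) : Decidable (Spec_res_sat nvars clauses out) := by unfold Spec_res_sat; infer_instance

-- ===== CLAIM (what is proved, stated in full; the proofs are below) =====
def Claim_equal_res_sat : Prop := ∀ (nvars : Int) (clauses : List (List Int)), Dom_res_sat nvars clauses → Spec_res_sat nvars clauses (res_sat nvars clauses)

-- ===== LEMMAS AND PROOFS =====

-- A's per-step function, named for the lemmas (res_sat's folded step reduces to it)
def aStep (clauses : List (List Int)) (T : PySem.Set Int) (i : Int) : PySem.Set Int :=
  if clauses.any (fun clause =>
      (clause.map (fun lit => -lit)).all (fun lit => PySem.Set.contains T lit || lit == i)) then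
    PySem.Set.add T (-i)
  else
    PySem.Set.add T i

-- B's residual of a clause, as a function of T
def resid (T : PySem.Set Int) (c : List Int) : List Int :=
  (c.map (fun lit => -lit)).filter (fun l => !(PySem.Set.contains T l))

lemma contains_add_eq (s : List Int) (x y : Int) :
    PySem.Set.contains (PySem.Set.add s x) y = (PySem.Set.contains s y || y == x) := by
  rw [Bool.eq_iff_iff]
  simp [PySem.Set.mem_add]

lemma all_filter_or (l : List Int) (p q : Int → Bool) :
    (l.filter (fun x => !p x)).all q = l.all (fun x => p x || q x) := by
  induction l with
  | nil => rfl
  | cons a t ih =>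
    by_cases h : p a = true <;> simp [List.all_cons, h, ih]

-- once some negated clause is fully covered by T, A adds the negation at every later step
lemma covered_foldl (clauses : List (List Int)) (c : List Int) (hc : c ∈ clauses) :
    ∀ (rest : List Int) (T : PySem.Set Int),
      (∀ x ∈ c.map (fun lit => -lit), x ∈ T) →
      rest.foldl (aStep clauses) T = rest.foldl (fun T j => PySem.Set.add T (-j)) T := by
  intro rest
  induction rest with
  | nil => intro T _; rfl
  | cons i rest ih =>
    intro T hT
    have hall : (c.map (fun lit => -lit)).all
        (fun lit => PySem.Set.contains T lit || lit == i) = true := by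
      rw [List.all_eq_true]
      intro x hx
      simp only [Bool.or_eq_true, PySem.Set.contains_iff]
      exact Or.inl (hT x hx)
    have hstep : aStep clauses T i = PySem.Set.add T (-i) := by
      unfold aStep
      rw [if_pos (List.any_eq_true.mpr ⟨c, hc, hall⟩)]
    have hT' : ∀ x ∈ c.map (fun lit => -lit), x ∈ PySem.Set.add T (-i) := by
      intro x hx
      rw [PySem.Set.mem_add]
      exact Or.inl (hT x hx)
    simp only [List.foldl_cons, hstep]
    exact ih (PySem.Set.add T (-i)) hT'

lemma resid_add (T : PySem.Set Int) (v : Int) (c : List Int) :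
    resid (PySem.Set.add T v) c = (resid T c).filter (fun l => l != v) := by
  unfold resid
  rw [List.filter_filter]
  apply List.filter_congr
  intro x _
  rw [contains_add_eq]
  rcases PySem.Set.contains T x <;> rcases h : (x == v) <;> simp_all

lemma go_eq (clauses : List (List Int)) :
    ∀ (rest : List Int) (T : PySem.Set Int),
      resSatAltGo rest (clauses.map (resid T)) T = rest.foldl (aStep clauses) T := by
  intro rest
  induction rest with
  | nil => intro T; rfl
  | cons i rest ih =>
    intro T
    rw [resSatAltGo]
    by_cases hemp : (clauses.map (resid T)).any (fun r => r.isEmpty) = true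
    · -- some residual is empty: both sides fill the rest with negations
      rw [if_pos hemp]
      rw [List.any_map, List.any_eq_true] at hemp
      obtain ⟨c, hc, hce⟩ := hemp
      have hnil : resid T c = [] := by simpa using hce
      have hcov : ∀ x ∈ c.map (fun lit => -lit), x ∈ T := by
        intro x hx
        by_contra hcx
        have hmem : x ∈ resid T c := by
          unfold resid
          rw [List.mem_filter]
          refine ⟨hx, ?_⟩
          simp [hcx]
        rw [hnil] at hmem
        exact absurd hmem (List.not_mem_nil)
      rw [covered_foldl clauses c hc (i :: rest) T hcov]
    · rw [if_neg hemp]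
      -- the two trigger conditions agree
      have hfun : ((fun r => r.all (fun l => l == i)) ∘ resid T) =
          (fun clause => (clause.map (fun lit => -lit)).all
            (fun lit => PySem.Set.contains T lit || lit == i)) := by
        funext c
        exact all_filter_or (c.map (fun lit => -lit)) (fun l => PySem.Set.contains T l)
          (fun l => l == i)
      have htrig : (clauses.map (resid T)).any (fun r => r.all (fun l => l == i)) =
          clauses.any (fun clause =>
            (clause.map (fun lit => -lit)).all
              (fun lit => PySem.Set.contains T lit || lit == i)) := by
        rw [List.any_map, hfun]
      by_cases hA : clauses.any (fun clause =>
          (clause.map (fun lit => -lit)).all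
            (fun lit => PySem.Set.contains T lit || lit == i)) = true
      · rw [htrig, if_pos hA]
        have hrem : (clauses.map (resid T)).map (fun r => r.filter (fun l => l != -i)) =
            clauses.map (resid (PySem.Set.add T (-i))) := by
          rw [List.map_map]
          apply List.map_congr_left
          intro c _
          exact (resid_add T (-i) c).symm
        simp only [hrem]
        rw [ih (PySem.Set.add T (-i))]
        have hstep : aStep clauses T i = PySem.Set.add T (-i) := by
          unfold aStep
          rw [if_pos hA]
        rw [List.foldl_cons, hstep]
      · rw [htrig, if_neg hA]
        have hrem : (clauses.map (resid T)).map (fun r => r.filter (fun l => l != i)) =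
            clauses.map (resid (PySem.Set.add T i)) := by
          rw [List.map_map]
          apply List.map_congr_left
          intro c _
          exact (resid_add T i c).symm
        simp only [hrem]
        rw [ih (PySem.Set.add T i)]
        have hstep : aStep clauses T i = PySem.Set.add T i := by
          unfold aStep
          rw [if_neg hA]
        rw [List.foldl_cons, hstep]

-- ===== VERDICT (by name: the statement is the Claim_ definition above) =====
theorem res_sat_spec : Claim_equal_res_sat := by
  intro nvars clauses _
  unfold Spec_res_sat res_sat res_sat_alt
  have h0 : clauses.map (fun clause => clause.map (fun lit => -lit)) =
      clauses.map (resid PySem.Set.empty) := by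
    apply List.map_congr_left
    intro c _
    unfold resid
    simp [PySem.Set.empty]
  rw [h0, go_eq clauses]
  rfl
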